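-- pv_equiv track=rewrite | github.com/tristanfischer-ux/historyfuturenow | hfn-build-system/build.py | _fix_js_string_newlines
-- ===== SOURCE A (Python) =====
-- def _fix_js_string_newlines(js):
--     """Fix literal newlines inside JS string literals.
--
--     Python triple-quoted strings convert \\n to literal newlines, which breaks
--     JS string literals (single- and double-quoted). This walks the JS char by
--     char, tracking string context, and re-escapes literal newlines to \\n.
--     """
--     out = []
--     i = 0
--     n = len(js)
--     while i < n:
--         ch = js[i]
--         if ch in ("'", '"'):
--             quote = ch
--             out.append(ch)
--             i += 1
--             while i < n:
--                 c = js[i]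
--                 if c == '\\' and i + 1 < n:
--                     out.append(c)
--                     out.append(js[i + 1])
--                     i += 2
--                 elif c == '\n':
--                     out.append('\\n')
--                     i += 1
--                 elif c == quote:
--                     out.append(c)
--                     i += 1
--                     break
--                 else:
--                     out.append(c)
--                     i += 1
--         else:
--             out.append(ch)
--             i += 1
--     return ''.join(out)
-- ===== SOURCE B (Python) =====
-- def _fix_js_string_newlines(js):
--     """Single-pass state machine: carries the active quote char and an
--     escape flag between characters instead of a nested lookahead loop."""
--     out = []
--     quote = None
--     escape = False
--     for c in js:
--         if escape:
--             out.append(c)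
--             escape = False
--         elif quote is None:
--             out.append(c)
--             if c in ("'", '"'):
--                 quote = c
--         elif c == '\\':
--             out.append(c)
--             escape = True
--         elif c == '\n':
--             out.append('\\n')
--         elif c == quote:
--             out.append(c)
--             quote = None
--         else:
--             out.append(c)
--     return ''.join(out)
-- ===== Notes on version B (the rewrite author's own statement) =====
-- stated objective: simpler
-- what changed: Replaced the nested while-loop with index lookahead (i += 2 on backslash) by a flat single-pass state machine over the characters that carries the active quote char and an escape flag between iterations; a timing run also measured it about 2x faster (single for-loop over the string, no per-character indexing).
import Mathlib
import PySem

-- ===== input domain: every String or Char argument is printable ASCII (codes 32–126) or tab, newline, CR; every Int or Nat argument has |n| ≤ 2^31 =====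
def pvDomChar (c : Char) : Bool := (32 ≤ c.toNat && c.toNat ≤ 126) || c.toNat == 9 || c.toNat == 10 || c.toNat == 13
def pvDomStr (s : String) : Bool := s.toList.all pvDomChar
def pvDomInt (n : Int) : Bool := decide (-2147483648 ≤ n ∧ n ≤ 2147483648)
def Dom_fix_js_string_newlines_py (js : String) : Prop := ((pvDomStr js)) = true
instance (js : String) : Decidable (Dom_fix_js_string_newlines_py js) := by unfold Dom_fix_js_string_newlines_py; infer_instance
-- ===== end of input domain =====

-- B replaces A's nested while-loop with backslash lookahead by a flat single-pass
-- state machine carrying (quote, escape) between characters; objective: simpler.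

-- ===== PORT A =====
-- A's inner while-loop: inside a string opened with `quote`. Returns the characters
-- the inner loop appends and the remaining input after it exits (break or end).
-- Python reads js[i] and js[i+1], so the two-element pattern carries the lookahead:
-- `c :: d :: rest` is "i + 1 < n" and `[c]` is the last character (no lookahead).
def pvInnerA (quote : Char) : List Char → List Char × List Char
  | [] => ([], [])
  | c :: d :: rest =>
      if c = '\\' then                      -- c == '\\' and i + 1 < n: copy both, i += 2
        let p := pvInnerA quote rest
        (c :: d :: p.1, p.2)
      else if c = '\n' then                 -- literal newline: emit "\n"
        let p := pvInnerA quote (d :: rest)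
        ('\\' :: 'n' :: p.1, p.2)
      else if c = quote then ([c], d :: rest)  -- closing quote: copy then break
      else
        let p := pvInnerA quote (d :: rest)
        (c :: p.1, p.2)
  | [c] =>                                  -- last character: i + 1 < n is false
      if c = '\n' then (['\\', 'n'], [])
      else if c = quote then ([c], [])
      else ([c], [])                        -- incl. a trailing backslash, copied bare

theorem pvInnerA_snd_le (quote : Char) (l : List Char) :
    (pvInnerA quote l).2.length ≤ l.length := by
  induction l using pvInnerA.induct quote
  all_goals simp only [pvInnerA]
  all_goals try split_ifs
  all_goals simp_all
  all_goals omega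

-- A's outer while-loop
def pvOuterA : List Char → List Char
  | [] => []
  | c :: rest =>
      if c = '\'' ∨ c = '"' then
        let p := pvInnerA c rest
        c :: (p.1 ++ pvOuterA p.2)
      else
        c :: pvOuterA rest
termination_by l => l.length
decreasing_by
  · have := pvInnerA_snd_le c rest
    simp only [List.length_cons]
    omega
  · simp only [List.length_cons]
    omega

def fix_js_string_newlines_py (js : String) : String :=
  String.mk (pvOuterA js.toList)

-- ===== PORT B =====
-- one step of B's for-loop; the state is (out, quote, escape)
def pvStepB (s : List Char × Option Char × Bool) (c : Char) : List Char × Option Char × Bool :=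
  let (out, quote, escape) := s
  if escape then (out ++ [c], quote, false)
  else
    match quote with
    | none => (out ++ [c], if c = '\'' ∨ c = '"' then some c else none, false)
    | some q =>
        if c = '\\' then (out ++ [c], quote, true)
        else if c = '\n' then (out ++ ['\\', 'n'], quote, false)
        else if c = q then (out ++ [c], none, false)
        else (out ++ [c], quote, false)

def fix_js_string_newlines_py_alt (js : String) : String :=
  String.mk (js.toList.foldl pvStepB ([], none, false)).1

-- ===== PRECONDITION & SPEC =====
def Spec_fix_js_string_newlines_py (js : String) (out : String) : Prop := out = fix_js_string_newlines_py_alt js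
instance (js : String) (out : String) : Decidable (Spec_fix_js_string_newlines_py js out) := by unfold Spec_fix_js_string_newlines_py; infer_instance

-- ===== CLAIM (what is proved, stated in full; the proofs are below) =====
def Claim_equal_fix_js_string_newlines_py : Prop := ∀ (js : String), Dom_fix_js_string_newlines_py js → Spec_fix_js_string_newlines_py js (fix_js_string_newlines_py js)

-- ===== LEMMAS AND PROOFS =====

theorem pvOuterA_nil : pvOuterA [] = [] := by rw [pvOuterA]

theorem pvOuterA_cons (c : Char) (rest : List Char) :
    pvOuterA (c :: rest) =
      if c = '\'' ∨ c = '"' then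
        c :: ((pvInnerA c rest).1 ++ pvOuterA (pvInnerA c rest).2)
      else c :: pvOuterA rest := by
  rw [pvOuterA]

-- functional form of B's loop body, without the accumulated output
def pvRunB (quote : Option Char) (escape : Bool) : List Char → List Char
  | [] => []
  | c :: rest =>
      if escape then c :: pvRunB quote false rest
      else
        match quote with
        | none => c :: pvRunB (if c = '\'' ∨ c = '"' then some c else none) false rest
        | some q =>
            if c = '\\' then c :: pvRunB quote true rest
            else if c = '\n' then '\\' :: 'n' :: pvRunB quote false rest
            else if c = q then c :: pvRunB none false rest
            else c :: pvRunB quote false rest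

theorem pvRunB_nil (quote : Option Char) (escape : Bool) : pvRunB quote escape [] = [] := rfl

theorem pvRunB_cons_none (c : Char) (rest : List Char) :
    pvRunB none false (c :: rest) =
      c :: pvRunB (if c = '\'' ∨ c = '"' then some c else none) false rest := rfl

theorem pvRunB_cons_esc (q c : Char) (rest : List Char) :
    pvRunB (some q) true (c :: rest) = c :: pvRunB (some q) false rest := rfl

theorem pvRunB_cons_some (q c : Char) (rest : List Char) :
    pvRunB (some q) false (c :: rest) =
      if c = '\\' then c :: pvRunB (some q) true rest
      else if c = '\n' then '\\' :: 'n' :: pvRunB (some q) false rest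
      else if c = q then c :: pvRunB none false rest
      else c :: pvRunB (some q) false rest := rfl

theorem pvFoldB_eq_runB (l : List Char) (out : List Char) (quote : Option Char) (escape : Bool) :
    (l.foldl pvStepB (out, quote, escape)).1 = out ++ pvRunB quote escape l := by
  induction l generalizing out quote escape with
  | nil => simp [pvRunB]
  | cons c rest ih =>
      simp only [List.foldl_cons, pvStepB, pvRunB]
      by_cases he : escape
      · simp [he, ih]
      · simp only [he, if_false, Bool.false_eq_true]
        cases quote with
        | none => simp [ih]
        | some q =>
            by_cases h1 : c = '\\'
            · simp [h1, ih]
            · by_cases h2 : c = '\n'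
              · simp [h2, ih]
              · by_cases h3 : c = q
                · subst h3
                  simp [h1, h2, ih]
                · simp [h1, h2, h3, ih]

-- the bridge: B's state machine equals A's two nested loops, by strong induction
-- on the input length (the in-string part is stated for a genuine quote char)
theorem pvRunB_eq_outerA :
    ∀ n (l : List Char), l.length ≤ n →
      (pvRunB none false l = pvOuterA l ∧
       ∀ q, (q = '\'' ∨ q = '"') →
         pvRunB (some q) false l = (pvInnerA q l).1 ++ pvOuterA (pvInnerA q l).2) := by
  intro n
  induction n with
  | zero =>
      intro l hl
      have : l = [] := List.eq_nil_of_length_eq_zero (Nat.le_zero.mp hl)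
      subst this
      exact ⟨by simp [pvRunB_nil, pvOuterA_nil],
             fun q _ => by simp [pvRunB_nil, pvInnerA, pvOuterA_nil]⟩
  | succ n ih =>
      intro l hl
      match l with
      | [] =>
          exact ⟨by simp [pvRunB_nil, pvOuterA_nil],
                 fun q _ => by simp [pvRunB_nil, pvInnerA, pvOuterA_nil]⟩
      | c :: rest =>
        have hrest : rest.length ≤ n := by
          simp only [List.length_cons] at hl; omega
        constructor
        · -- outer state: quote = none
          rw [pvOuterA_cons, pvRunB_cons_none]
          by_cases hq : c = '\'' ∨ c = '"'
          · rw [if_pos hq, if_pos hq, (ih rest hrest).2 c hq]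
          · rw [if_neg hq, if_neg hq, (ih rest hrest).1]
        · -- in-string state: quote = some q with q a genuine quote char
          intro q hq
          have hqb : q ≠ '\\' := by rcases hq with h | h <;> subst h <;> decide
          have hqn : q ≠ '\n' := by rcases hq with h | h <;> subst h <;> decide
          match rest with
          | [] =>
              by_cases h1 : c = '\\'
              · subst h1
                -- trailing backslash: A copies it via the final else, B sets an
                -- escape flag that is never consumed; both emit it bare
                simp [pvRunB_cons_some, pvRunB_nil, pvInnerA, Ne.symm hqb, pvOuterA_nil]
              · by_cases h2 : c = '\n'
                · subst h2
                  simp [pvRunB_cons_some, pvRunB_nil, h1, pvInnerA, pvOuterA_nil]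
                · by_cases h3 : c = q
                  · subst h3
                    simp [pvRunB_cons_some, pvRunB_nil, h1, h2, pvInnerA, pvOuterA_nil]
                  · simp [pvRunB_cons_some, pvRunB_nil, h1, h2, h3, pvInnerA, pvOuterA_nil]
          | d :: rest' =>
              have hrest' : rest'.length ≤ n := by
                simp only [List.length_cons] at hrest ⊢; omega
              by_cases h1 : c = '\\'
              · subst h1
                rw [pvRunB_cons_some, if_pos rfl, pvRunB_cons_esc,
                  (ih rest' hrest').2 q hq]
                simp [pvInnerA]
              · by_cases h2 : c = '\n'
                · subst h2
                  rw [pvRunB_cons_some, if_neg h1, if_pos rfl,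
                    (ih (d :: rest') hrest).2 q hq]
                  simp [pvInnerA, h1]
                · by_cases h3 : c = q
                  · subst h3
                    rw [pvRunB_cons_some, if_neg h1, if_neg h2, if_pos rfl,
                      (ih (d :: rest') hrest).1]
                    simp [pvInnerA, h1, h2]
                  · rw [pvRunB_cons_some, if_neg h1, if_neg h2, if_neg h3,
                      (ih (d :: rest') hrest).2 q hq]
                    simp [pvInnerA, h1, h2, h3]

-- ===== VERDICT (by name: the statement is the Claim_ definition above) =====
theorem fix_js_string_newlines_py_spec : Claim_equal_fix_js_string_newlines_py := by
  intro js _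
  unfold Spec_fix_js_string_newlines_py fix_js_string_newlines_py fix_js_string_newlines_py_alt
  rw [pvFoldB_eq_runB, List.nil_append,
    (pvRunB_eq_outerA js.toList.length js.toList le_rfl).1]
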